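-- pv_equiv track=rewrite | github.com/snipe02/DESENVOLVIMENTO-ORIENTADO-A-TESTES | LISTA_2/04_quest_doot.py | procura_maior
-- ===== SOURCE A (Python) =====
-- def procura_maior(lista):
--     maior = lista[0]
--     pos = 0
--     for i in range(len(lista)):
--         if lista[i] >= maior:
--            maior = lista[i]
--            pos = i
--     return maior,pos
-- ===== SOURCE B (Python) =====
-- def procura_maior(lista):
--     maior = max(lista)
--     pos = len(lista) - 1 - lista[::-1].index(maior)
--     return maior, pos
-- ===== Notes on version B (the rewrite author's own statement) =====
-- stated objective: idiomatic
-- what changed: Replaces the guarded index loop by builtin max() followed by an index search in the reversed list to locate the last occurrence (matching A's greater-or-equal tie-breaking); Pre_ excludes the empty list, on which both programs raise (A IndexError, B ValueError).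
import Mathlib
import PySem

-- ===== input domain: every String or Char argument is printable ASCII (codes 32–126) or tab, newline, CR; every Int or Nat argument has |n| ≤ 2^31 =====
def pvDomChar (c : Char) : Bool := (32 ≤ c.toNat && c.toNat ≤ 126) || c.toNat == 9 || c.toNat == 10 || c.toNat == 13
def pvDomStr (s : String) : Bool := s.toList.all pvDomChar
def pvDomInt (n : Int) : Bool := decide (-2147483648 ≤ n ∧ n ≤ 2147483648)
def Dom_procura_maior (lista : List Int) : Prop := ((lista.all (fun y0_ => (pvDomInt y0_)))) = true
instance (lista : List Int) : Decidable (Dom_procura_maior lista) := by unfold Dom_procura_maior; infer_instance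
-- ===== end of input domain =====

-- B replaces A's single guarded index scan by max() plus a reversed-list index search for the last occurrence (idiomatic decomposition, same cost).

-- ===== PORT A =====
-- loop body: if lista[i] >= maior: maior, pos = lista[i], i
def stepA (lista : List Int) (s : Int × Int) (i : Int) : Int × Int :=
  match PySem.List.pyGet? lista i with
  | some v => if s.1 ≤ v then (v, i) else s
  | none => s   -- unreachable: i is drawn from range(len(lista))

def procura_maior (lista : List Int) : Int × Int :=
  match PySem.List.pyGet? lista 0 with
  | none => (0, 0)   -- IndexError on empty list; excluded by Pre_
  | some m0 => (PySem.List.pyRange 0 (lista.length : Int) 1).foldl (stepA lista) (m0, 0)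

-- ===== PORT B =====
def procura_maior_alt (lista : List Int) : Int × Int :=
  let maior := (PySem.List.max? lista (fun y => y)).getD 0   -- max(lista); ValueError on empty, excluded by Pre_
  let rev := (PySem.List.slice? lista none none (-1)).getD []   -- lista[::-1]
  let pos : Int := (lista.length : Int) - 1 - ((PySem.List.index? rev maior).getD 0 : Int)
  (maior, pos)

-- ===== PRECONDITION & SPEC =====
-- Both programs raise on the empty list (A: IndexError at the initial subscript; B: ValueError from max()).
def Pre_procura_maior (lista : List Int) : Prop := lista ≠ []
instance (lista : List Int) : Decidable (Pre_procura_maior lista) := by unfold Pre_procura_maior; infer_instance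
def pvWitness_procura_maior : List Int := [3, 7, 7, 1]

def Spec_procura_maior (lista : List Int) (out : Int × Int) : Prop := out = procura_maior_alt lista
instance (lista : List Int) (out : Int × Int) : Decidable (Spec_procura_maior lista out) := by unfold Spec_procura_maior; infer_instance

-- ===== CLAIM (what is proved, stated in full; the proofs are below) =====
def Claim_equal_procura_maior : Prop := ∀ (lista : List Int), Dom_procura_maior lista → Pre_procura_maior lista → Spec_procura_maior lista (procura_maior lista)

-- ===== LEMMAS AND PROOFS =====

-- canonical value of B on a nonempty list
def bval (l : List Int) : Int × Int :=
  ((PySem.List.max? l (fun y => y)).getD 0,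
   (l.length : Int) - 1 - ((PySem.List.index? l.reverse ((PySem.List.max? l (fun y => y)).getD 0)).getD 0 : Int))

lemma stepA_agree (ys : List Int) (x : Int) (s : Int × Int) (i : Int) (h0 : 0 ≤ i) (h1 : i < (ys.length : Int)) :
    stepA (ys ++ [x]) s i = stepA ys s i := by
  unfold stepA
  have e1 : PySem.List.pyGet? (ys ++ [x]) i = (ys ++ [x])[i.toNat]? := PySem.List.pyGet?_of_nonneg _ h0
  have e2 : PySem.List.pyGet? ys i = ys[i.toNat]? := PySem.List.pyGet?_of_nonneg _ h0
  rw [e1, e2, List.getElem?_append_left (by omega)]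

lemma foldA_snoc (ys : List Int) (x m0 : Int) :
    (PySem.List.pyRange 0 ((ys ++ [x]).length : Int) 1).foldl (stepA (ys ++ [x])) (m0, 0)
    = stepA (ys ++ [x]) ((PySem.List.pyRange 0 (ys.length : Int) 1).foldl (stepA ys) (m0, 0)) (ys.length : Int) := by
  have hlen : (((ys ++ [x]).length : Int)) = (ys.length : Int) + 1 := by simp
  rw [hlen, PySem.List.pyRange_one_succ_right (by positivity), List.foldl_append]
  simp only [List.foldl_cons, List.foldl_nil]
  congr 1
  apply PySem.List.foldl_congr_mem
  intro s i hi
  rw [PySem.List.mem_pyRange_one] at hi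
  exact stepA_agree ys x s i hi.1 hi.2

lemma alt_eq (l : List Int) (hl : l ≠ []) : procura_maior_alt l = bval l := by
  obtain ⟨x, xs, rfl⟩ := List.exists_cons_of_ne_nil hl
  simp [procura_maior_alt, bval, PySem.List.slice?_none_none_neg_one]

lemma a_eq (l : List Int) (hl : l ≠ []) :
    procura_maior l = (PySem.List.pyRange 0 (l.length : Int) 1).foldl (stepA l) (l.head hl, 0) := by
  obtain ⟨x, xs, rfl⟩ := List.exists_cons_of_ne_nil hl
  simp [procura_maior]

lemma max_snoc (l : List Int) (x : Int) (hl : l ≠ []) :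
    (PySem.List.max? (l ++ [x]) (fun y => y)).getD 0
    = max ((PySem.List.max? l (fun y => y)).getD 0) x := by
  obtain ⟨y, t, rfl⟩ := List.exists_cons_of_ne_nil hl
  rw [List.cons_append, PySem.List.max?_id_cons, PySem.List.max?_id_cons]
  simp [List.foldl_append]

lemma max_mem (l : List Int) (hl : l ≠ []) :
    (PySem.List.max? l (fun y => y)).getD 0 ∈ l := by
  obtain ⟨y, t, rfl⟩ := List.exists_cons_of_ne_nil hl
  rw [PySem.List.max?_id_cons, Option.getD_some]
  exact PySem.List.max?_mem (PySem.List.max?_id_cons y t)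

lemma main_eq (l : List Int) (hl : l ≠ []) : procura_maior l = procura_maior_alt l := by
  rw [alt_eq l hl]
  induction l using List.reverseRecOn with
  | nil => exact absurd rfl hl
  | append_singleton ys x ih =>
    rcases eq_or_ne ys [] with rfl | hys
    · have hr : PySem.List.pyRange 0 (1 : Int) 1 = [0] := by decide
      simp [procura_maior, bval, stepA, hr,
        PySem.List.max?_id_cons, PySem.List.index?_cons_self]
    · have hne : ys ++ [x] ≠ [] := by simp
      have hhead : (ys ++ [x]).head hne = ys.head hys := List.head_append_of_ne_nil hys
      rw [a_eq _ hne, hhead, foldA_snoc, ← a_eq ys hys, ih hys]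
      have hget : PySem.List.pyGet? (ys ++ [x]) ((ys.length : Int)) = some x := by
        have := PySem.List.pyGet?_append_length (pre := ys) (y := x) (ys := [])
        simpa using this
      unfold stepA
      rw [hget]
      have hmax := max_snoc ys x hys
      have hMmem : (PySem.List.max? ys (fun y => y)).getD 0 ∈ ys := max_mem ys hys
      show (if (bval ys).1 ≤ x then (x, (ys.length : Int)) else bval ys) = bval (ys ++ [x])
      by_cases hcmp : (bval ys).1 ≤ x
      · rw [if_pos hcmp]
        have hfst : (bval ys).1 = (PySem.List.max? ys (fun y => y)).getD 0 := rfl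
        rw [hfst] at hcmp
        have h1 : (PySem.List.max? (ys ++ [x]) (fun y => y)).getD 0 = x := by
          rw [hmax]; exact max_eq_right hcmp
        unfold bval
        rw [h1, List.reverse_append]
        simp only [List.reverse_cons, List.reverse_nil, List.nil_append, List.singleton_append,
          PySem.List.index?_cons_self, Option.getD_some, List.length_append, List.length_singleton]
        rw [Prod.mk.injEq]
        exact ⟨rfl, by push_cast; ring⟩
      · rw [if_neg hcmp]
        have hfst : (bval ys).1 = (PySem.List.max? ys (fun y => y)).getD 0 := rfl
        rw [hfst] at hcmp
        push_neg at hcmp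
        have h1 : (PySem.List.max? (ys ++ [x]) (fun y => y)).getD 0
            = (PySem.List.max? ys (fun y => y)).getD 0 := by
          rw [hmax]; exact max_eq_left (le_of_lt hcmp)
        have hMrev : (PySem.List.max? ys (fun y => y)).getD 0 ∈ ys.reverse := by
          simpa using hMmem
        obtain ⟨k, hk⟩ := Option.isSome_iff_exists.mp
          ((PySem.List.index?_isSome_iff _ _).mpr hMrev)
        have hxne : x ≠ (PySem.List.max? ys (fun y => y)).getD 0 := ne_of_lt hcmp
        unfold bval
        rw [h1, List.reverse_append]
        simp only [List.reverse_cons, List.reverse_nil, List.nil_append, List.singleton_append]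
        rw [PySem.List.index?_cons_of_ne _ hxne, hk]
        simp only [Option.map_some, Option.getD_some, List.length_append, List.length_singleton]
        rw [Prod.mk.injEq]
        exact ⟨rfl, by push_cast; ring⟩

-- ===== VERDICT (by name: the statement is the Claim_ definition above) =====
theorem procura_maior_spec : Claim_equal_procura_maior := by
  intro lista _ hpre
  unfold Spec_procura_maior
  exact main_eq lista hpre
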